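-- pv_equiv track=rewrite | github.com/mdd666/yidun | yidun_encipher.py | f
-- ===== SOURCE A (Python) =====
-- def f(e: str) -> list:
--     if len(e) == 0:
--         return []
--     i = []
--     r = 0
--     for o in range(int(len(e) / 2)):
--         a = int(e[r], 16) << 4
--         r += 1
--         s = int(e[r], 16)
--         r += 1
--         i.append(__toByte(a + s))
--     return i
--
-- def __toByte(e: int) -> list:
--     if e < -128:
--         return __toByte(128 - (-128 - e))
--     elif (e >= -128 and e <= 127):
--         return e
--     else:
--         return __toByte(-129 + e - 127)
-- ===== SOURCE B (Python) =====
-- def f(e: str) -> list: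
--     def signed(b: int) -> int:
--         return b - 256 if b >= 128 else b
--     return [signed(int(e[i:i + 2], 16)) for i in range(0, len(e) // 2 * 2, 2)]
-- ===== Notes on version B (the rewrite author's own statement) =====
-- stated objective: simpler
-- what changed: Replaces the stateful index loop with a shift-and-add nibble pair and the recursive __toByte wrap-around helper by a single comprehension that parses each two-character slice with one int(s,16) call and applies the closed-form signed conversion b-256 if b>=128 else b.
import Mathlib
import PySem

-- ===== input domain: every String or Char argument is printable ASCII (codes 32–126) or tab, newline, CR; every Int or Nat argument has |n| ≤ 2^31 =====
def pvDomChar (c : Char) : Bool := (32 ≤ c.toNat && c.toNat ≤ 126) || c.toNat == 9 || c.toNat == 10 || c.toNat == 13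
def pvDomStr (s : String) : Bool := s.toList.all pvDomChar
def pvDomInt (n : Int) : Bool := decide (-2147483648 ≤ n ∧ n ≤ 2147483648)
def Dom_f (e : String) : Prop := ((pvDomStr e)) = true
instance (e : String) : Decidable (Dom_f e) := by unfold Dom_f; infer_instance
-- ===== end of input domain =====

-- B replaces A's stateful index loop and recursive __toByte helper by a single
-- comprehension over pair offsets with one int(slice,16) parse and a closed-form
-- signed conversion (objective: simpler).



-- ===== PORT A =====
-- int(c, 16) for a single character c; Python raises ValueError on a non-hex
-- character, which Pre_f excludes, so the default 0 is never reached inside Pre_f.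
def pvHex (c : Char) : Int := (PySem.Int.ofCharsBase? [c] 16).getD 0

-- literal port of __toByte (well-founded on the distance to [-128,127])
def pvToByte (e : Int) : Int :=
  if e < -128 then pvToByte (128 - (-128 - e))
  else if -128 ≤ e ∧ e ≤ 127 then e
  else pvToByte (-129 + e - 127)
termination_by (if e < -128 then (-e - 128).toNat else (e - 127).toNat)
decreasing_by all_goals (split_ifs <;> omega)

-- loop body of A: state = (accumulated list i, running index r)
def pvStepA (cs : List Char) (st : List Int × Nat) (_ : Nat) : List Int × Nat :=
  let a := pvHex (cs.getD st.2 ' ') <<< 4      -- int(e[r],16) << 4 (in range inside Pre_f)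
  let r1 := st.2 + 1
  let s := pvHex (cs.getD r1 ' ')
  (st.1 ++ [pvToByte (a + s)], r1 + 1)

-- int(len(e)/2) on a nonnegative int equals Nat division by 2
def f (e : String) : List Int :=
  if e.toList.length = 0 then []
  else ((List.range (e.toList.length / 2)).foldl (pvStepA e.toList) ([], 0)).1

-- ===== PORT B =====
def pvSigned (b : Int) : Int := if 128 ≤ b then b - 256 else b

-- len(e) // 2 * 2 ported with Nat division (len is nonnegative);
-- int(e[i:i+2], 16) ported via PySem slice + ofCharsBase? (default 0 unreachable inside Pre_f)
def f_alt (e : String) : List Int :=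
  (PySem.List.pyRange 0 ((e.toList.length / 2 * 2 : Nat) : Int) 2).map
    (fun i => pvSigned ((PySem.Int.ofCharsBase? (PySem.List.slice e.toList (some i) (some (i + 2))) 16).getD 0))

-- ===== PRECONDITION & SPEC =====
def pvHexChars : List Char :=
  ['0','1','2','3','4','5','6','7','8','9','a','b','c','d','e','f','A','B','C','D','E','F']

-- Pre_f: exactly the inputs on which A returns (A raises ValueError as soon as a
-- character in the parsed even-length prefix is not a hex digit).
def Pre_f (e : String) : Prop :=
  (e.toList.take (e.toList.length / 2 * 2)).all (fun c => pvHexChars.contains c) = true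
instance (e : String) : Decidable (Pre_f e) := by unfold Pre_f; infer_instance

def pvWitness_f : String := "Ff00a7"

def Spec_f (e : String) (out : List Int) : Prop := out = f_alt e
instance (e : String) (out : List Int) : Decidable (Spec_f e out) := by unfold Spec_f; infer_instance

-- ===== CLAIM (what is proved, stated in full; the proofs are below) =====
def Claim_equal_f : Prop := ∀ (e : String), Dom_f e → Pre_f e → Spec_f e (f e)

-- ===== LEMMAS AND PROOFS =====

-- the pair parse agrees with the two nibble parses, with bounds, for hex digits
set_option maxRecDepth 8000 in
lemma pvPair_eq : ∀ c ∈ pvHexChars, ∀ d ∈ pvHexChars,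
    (PySem.Int.ofCharsBase? [c, d] 16).getD 0 = pvHex c <<< 4 + pvHex d ∧
    0 ≤ pvHex c <<< 4 + pvHex d ∧ pvHex c <<< 4 + pvHex d ≤ 255 := by
  intro c hc
  fin_cases hc <;> (intro d hd; fin_cases hd) <;> decide

lemma pvToByte_eq (v : Int) (h0 : 0 ≤ v) (h1 : v ≤ 255) : pvToByte v = pvSigned v := by
  rw [pvToByte]
  split_ifs with h2 h3
  · omega
  · simp [pvSigned]; omega
  · rw [pvToByte]
    split_ifs with h4 h5
    · omega
    · simp [pvSigned]; omega
    · omega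

lemma pvFoldA (cs : List Char) (n : Nat) (acc : List Int) (r : Nat) :
    (List.range n).foldl (pvStepA cs) (acc, r) =
      (acc ++ (List.range n).map
        (fun j => pvToByte (pvHex (cs.getD (r + 2 * j) ' ') <<< 4 + pvHex (cs.getD (r + 2 * j + 1) ' '))),
       r + 2 * n) := by
  induction n with
  | zero => simp
  | succ n ih =>
    rw [List.range_succ, List.foldl_append, ih, List.map_append]
    have h1 : r + 2 * n + 1 + 1 = r + 2 * (n + 1) := by omega
    simp only [List.foldl_cons, List.foldl_nil, pvStepA, List.map_cons, List.map_nil,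
      List.append_assoc, h1]

lemma pvRange_two (m : Nat) :
    PySem.List.pyRange 0 ((2 * m : Nat) : Int) 2 = (List.range m).map (fun k => ((2 * k : Nat) : Int)) := by
  rw [PySem.List.pyRange_of_pos 0 ((2 * m : Nat) : Int) (by norm_num)]
  rcases Nat.eq_zero_or_pos m with h | h
  · subst h; simp
  · have hlt : (0 : Int) < ((2 * m : Nat) : Int) := by push_cast; omega
    rw [if_pos hlt]
    have : ((((2 * m : Nat) : Int) - 0 + 2 - 1) / 2).toNat = m := by
      push_cast; omega
    rw [this]
    apply List.map_congr_left
    intro k _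
    push_cast; ring

-- ===== VERDICT (by name: the statement is the Claim_ definition above) =====
theorem f_spec : Claim_equal_f := by
  intro e _hd hpre
  unfold Spec_f f f_alt
  set cs := e.toList with hcs
  set n := cs.length / 2 with hn
  have hrange : (cs.length / 2 * 2 : Nat) = 2 * n := by omega
  rw [hrange, pvRange_two, List.map_map]
  by_cases h0 : cs.length = 0
  · rw [if_pos h0]
    have : n = 0 := by omega
    simp [this]
  · rw [if_neg h0, pvFoldA]
    simp only [Nat.zero_add]
    apply List.map_congr_left
    intro j hj
    have hj' : j < n := List.mem_range.mp hj
    have h2j1 : 2 * j + 1 < cs.length := by omega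
    have h2j : 2 * j < cs.length := by omega
    -- the two characters of the pair are hex digits, by Pre_f
    have hmem : ∀ i, i < 2 * n → cs.getD i ' ' ∈ pvHexChars := by
      intro i hi
      have hilen : i < cs.length := by omega
      have : cs.getD i ' ' = (cs.take (cs.length / 2 * 2))[i]'(by
        simp [List.length_take]; omega) := by
        rw [List.getElem_take, List.getD_eq_getElem cs ' ' hilen]
      rw [this]
      have hmem' := List.all_eq_true.mp hpre ((cs.take (cs.length / 2 * 2))[i]'(by
        simp [List.length_take]; omega)) (List.getElem_mem _)
      simpa using hmem'
    have hc := hmem (2 * j) (by omega)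
    have hd := hmem (2 * j + 1) (by omega)
    -- evaluate B's slice to the same two characters
    have hslice : PySem.List.slice cs (some ((2 * j : Nat) : Int)) (some (((2 * j : Nat) : Int) + 2)) =
        [cs[2 * j]'h2j, cs[2 * j + 1]'h2j1] := by
      have h2 : (((2 * j : Nat) : Int) + 2) = (((2 * j : Nat) : Int) + ((2 : Nat) : Int)) := by norm_num
      rw [h2, PySem.List.slice_natCast_add]
      apply List.ext_getElem
      · simp [List.length_take, List.length_drop]; omega
      · intro i hi1 hi2
        simp only [List.length_take, List.length_drop] at hi1
        have hii : i < 2 := by omega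
        interval_cases i <;> simp [List.getElem_take, List.getElem_drop]
    simp only [Function.comp_apply, hslice]
    have hgc : cs.getD (2 * j) ' ' = cs[2 * j]'h2j := List.getD_eq_getElem cs ' ' h2j
    have hgd : cs.getD (2 * j + 1) ' ' = cs[2 * j + 1]'h2j1 := List.getD_eq_getElem cs ' ' h2j1
    obtain ⟨heq, hlo, hhi⟩ := pvPair_eq _ (hgc ▸ hc) _ (hgd ▸ hd)
    rw [heq, hgc, hgd]
    exact pvToByte_eq _ hlo hhi
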